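-- pv_equiv track=rewrite | github.com/bayoojo1/Techdegree-Project-2 | app.py | balance_teams
-- ===== SOURCE A (Python) =====
-- def balance_teams(cleaned_players_list, teams):
--     extracted_players_names = []
--     for player in cleaned_players_list:
--         extracted_players_names.append(player['name'])
--
--     populate_teams = {}
--     for index, team in enumerate(teams):
--         populate_teams[team] = []
--         for player in extracted_players_names[index::len(teams)]:
--             populate_teams[team].append(player)
--
--     return populate_teams
-- ===== SOURCE B (Python) =====
-- def balance_teams(cleaned_players_list, teams):
--     names = [player['name'] for player in cleaned_players_list]
--     if not teams:
--         return {}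
--     k = len(teams)
--     buckets = [[] for _ in teams]
--     for i, name in enumerate(names):
--         buckets[i % k].append(name)
--     return dict(zip(teams, buckets))
-- ===== Notes on version B (the rewrite author's own statement) =====
-- stated objective: idiomatic
-- what changed: Replaces A's per-team strided-slice loop (one slice pass per team) by a single round-robin pass over the extracted names into index-modulo buckets, then dict(zip(teams, buckets)); the empty-teams guard returns {} as A does.
import Mathlib
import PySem

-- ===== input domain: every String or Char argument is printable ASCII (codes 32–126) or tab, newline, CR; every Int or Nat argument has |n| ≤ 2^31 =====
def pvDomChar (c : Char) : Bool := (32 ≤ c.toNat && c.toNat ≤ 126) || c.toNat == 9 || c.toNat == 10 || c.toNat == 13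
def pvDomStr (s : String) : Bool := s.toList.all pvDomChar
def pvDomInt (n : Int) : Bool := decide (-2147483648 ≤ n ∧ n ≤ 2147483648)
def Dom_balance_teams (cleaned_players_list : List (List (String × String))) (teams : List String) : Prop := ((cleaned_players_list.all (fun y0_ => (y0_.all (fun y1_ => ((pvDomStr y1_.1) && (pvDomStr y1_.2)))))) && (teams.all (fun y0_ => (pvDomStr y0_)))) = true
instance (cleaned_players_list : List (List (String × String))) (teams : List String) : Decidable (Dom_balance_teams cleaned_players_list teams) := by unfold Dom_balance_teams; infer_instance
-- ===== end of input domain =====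

-- B replaces A's per-team strided-slice loop by one round-robin pass into index-modulo
-- buckets followed by dict(zip(teams, buckets)) — same values, more idiomatic (not faster).

-- ===== PORT A =====
-- player['name'] is ported as get? … |>.getD ""; Pre_balance_teams below excludes the
-- inputs where the Python raises KeyError, so the default is never reached under Pre_.
def balance_teams (cleaned_players_list : List (List (String × String))) (teams : List String) : List (String × List String) :=
  let extracted_players_names : List String := cleaned_players_list.foldl
    (fun acc player => acc ++ [((PySem.Dict.mk player).get? "name").getD ""]) []
  let populate_teams : PySem.Dict String (List String) := (PySem.List.enumerate teams).foldl
    (fun d it =>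
      let d := d.insert it.2 ([] : List String)
      ((PySem.List.slice? extracted_players_names (some it.1) none ((teams.length : Nat) : Int)).getD []).foldl
        (fun d player => d.modify it.2 [] (fun v => v ++ [player])) d)
    PySem.Dict.empty
  populate_teams.items

-- ===== PORT B =====
def balance_teams_alt (cleaned_players_list : List (List (String × String))) (teams : List String) : List (String × List String) :=
  let names : List String := cleaned_players_list.map
    (fun player => ((PySem.Dict.mk player).get? "name").getD "")
  if teams.isEmpty then []
  else
    let k : Nat := teams.length
    let buckets0 : List (List String) := teams.map (fun _ => ([] : List String))
    let buckets := (PySem.List.enumerate names).foldl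
      (fun bs it =>
        let idx := (PySem.Int.mod it.1 (k : Int)).toNat
        bs.set idx (bs.getD idx [] ++ [it.2]))
      buckets0
    ((teams.zip buckets).foldl (fun d p => d.insert p.1 p.2)
      (PySem.Dict.empty : PySem.Dict String (List String))).items

-- ===== PRECONDITION & SPEC =====
-- Pre_ excludes exactly the inputs where the Python A raises KeyError: some player dict
-- has no 'name' key (B raises the same KeyError there).
def Pre_balance_teams (cleaned_players_list : List (List (String × String))) (teams : List String) : Prop :=
  cleaned_players_list.all (fun player => player.any (fun q => q.1 == "name")) = true
instance (cleaned_players_list : List (List (String × String))) (teams : List String) : Decidable (Pre_balance_teams cleaned_players_list teams) := by unfold Pre_balance_teams; infer_instance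

def pvWitness_balance_teams : (List (List (String × String))) × List String :=
  ([[("name", "Alice")], [("name", "Bob")], [("name", "Cara")]], ["Reds", "Blues"])

def Spec_balance_teams (cleaned_players_list : List (List (String × String))) (teams : List String) (out : List (String × List String)) : Prop := out = balance_teams_alt cleaned_players_list teams
instance (cleaned_players_list : List (List (String × String))) (teams : List String) (out : List (String × List String)) : Decidable (Spec_balance_teams cleaned_players_list teams out) := by unfold Spec_balance_teams; infer_instance

-- ===== CLAIM (what is proved, stated in full; the proofs are below) =====
def Claim_equal_balance_teams : Prop := ∀ (cleaned_players_list : List (List (String × String))) (teams : List String), Dom_balance_teams cleaned_players_list teams → Pre_balance_teams cleaned_players_list teams → Spec_balance_teams cleaned_players_list teams (balance_teams cleaned_players_list teams)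


-- ===== LEMMAS AND PROOFS =====

theorem pvFoldlAppendMap {alpha beta : Type} (f : alpha → beta) (l : List alpha) (acc : List beta) :
    l.foldl (fun a p => a ++ [f p]) acc = acc ++ l.map f := by
  induction l generalizing acc with
  | nil => simp
  | cons x t ih => simp [List.foldl_cons, ih]


-- A's strided slice names[j::k], as an Option-free value
def pvSliceList {alpha : Type} (xs : List alpha) (j k : Nat) : List alpha :=
  (PySem.List.slice? xs (some (j : Int)) none (k : Int)).getD []

-- every k-th element, starting at the head
def pvStride {alpha : Type} : List alpha → Nat → List alpha
  | [], _ => []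
  | x :: t, k => x :: pvStride (t.drop (k - 1)) k
  termination_by l _ => l.length
  decreasing_by simp

-- what bucket j collects in one round-robin pass starting at global index i
def pvCollect {alpha : Type} : List alpha → Nat → Nat → Nat → List alpha
  | [], _, _, _ => []
  | x :: t, i, j, k => (if i % k = j then [x] else []) ++ pvCollect t (i + 1) j k

theorem pvModSmall (m k : Nat) (hk : 0 < k) (hm : m < 2 * k) :
    m % k = if m < k then m else m - k := by
  split
  · exact Nat.mod_eq_of_lt (by assumption)
  · rw [Nat.mod_eq_sub_mod (by omega), Nat.mod_eq_of_lt (by omega)]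

theorem pvSuccMod (i k : Nat) (hk : 0 < k) :
    (i + 1) % k = if i % k + 1 = k then 0 else i % k + 1 := by
  have hr : i % k < k := Nat.mod_lt _ hk
  rw [← Nat.mod_add_mod, pvModSmall (i % k + 1) k hk (by omega)]
  split_ifs <;> omega

theorem pvInnerLoop (t : String) (l : List String) :
    ∀ (v0 : List String) (d : PySem.Dict String (List String)),
      l.foldl (fun d p => d.modify t [] (fun v => v ++ [p])) (d.insert t v0)
        = d.insert t (v0 ++ l) := by
  induction l with
  | nil => intro v0 d; simp
  | cons x xs ih =>
    intro v0 d
    simp only [List.foldl_cons]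
    have h1 : (d.insert t v0).modify t [] (fun v => v ++ [x]) = d.insert t (v0 ++ [x]) := by
      rw [PySem.Dict.modify, PySem.Dict.getD_insert_self, PySem.Dict.insert_insert_self]
    rw [h1, ih (v0 ++ [x]) d]
    simp

theorem pvSliceList_closed {alpha : Type} (xs : List alpha) (j k : Nat) (hk : 0 < k) :
    pvSliceList xs j k
      = (List.range ((xs.length - j + k - 1) / k)).filterMap (fun i => xs[j + k * i]?) := by
  have hk0 : ¬ ((k : Int) = 0) := by exact_mod_cast hk.ne'
  have hknn : ¬ ((k : Int) < 0) := by omega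
  have hjnn : ¬ ((j : Int) < 0) := by omega
  simp only [pvSliceList, PySem.List.slice?, PySem.List.sliceIndices, if_neg hk0,
    if_neg hknn, if_neg hjnn]
  by_cases hj : j < xs.length
  · have hmin : min (j : Int) (xs.length : Int) = (j : Int) := by omega
    rw [hmin]
    rw [if_pos (by exact_mod_cast hk), if_pos (by exact_mod_cast hj)]
    have hcnt : ((xs.length : Int) - (j : Int) + (k : Int) - 1) = ((xs.length - j + k - 1 : Nat) : Int) := by
      omega
    rw [hcnt, ← Int.natCast_div, Int.toNat_natCast, Option.getD_some]
    apply List.filterMap_congr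
    intro x _
    rw [← Nat.cast_mul, ← Nat.cast_add, Int.toNat_natCast]
  · have hmin : min (j : Int) (xs.length : Int) = (xs.length : Int) := by omega
    rw [hmin]
    rw [if_pos (by exact_mod_cast hk), if_neg (by omega)]
    have hcnt : (xs.length - j + k - 1) / k = 0 := by
      have h1 : xs.length - j + k - 1 = k - 1 := by omega
      rw [h1, Nat.div_eq_of_lt (by omega)]
    rw [hcnt]
    simp

theorem pvSliceList_ge {alpha : Type} (xs : List alpha) (j k : Nat) (hk : 0 < k)
    (hj : xs.length ≤ j) : pvSliceList xs j k = [] := by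
  rw [pvSliceList_closed xs j k hk]
  have h1 : xs.length - j + k - 1 = k - 1 := by omega
  rw [h1, Nat.div_eq_of_lt (by omega)]
  rfl

theorem pvSliceList_lt {alpha : Type} (xs : List alpha) (j k : Nat) (hk : 0 < k)
    (hj : j < xs.length) :
    pvSliceList xs j k = xs[j] :: pvSliceList xs (j + k) k := by
  rw [pvSliceList_closed xs j k hk, pvSliceList_closed xs (j + k) k hk]
  have hcnt : (xs.length - j + k - 1) / k = (xs.length - (j + k) + k - 1) / k + 1 := by
    by_cases h : j + k ≤ xs.length
    · have h1 : xs.length - j + k - 1 = (xs.length - (j + k) + k - 1) + k := by omega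
      rw [h1, Nat.add_div_right _ hk]
    · have h1 : xs.length - j + k - 1 = (xs.length - j - 1) + k := by omega
      have h2 : xs.length - (j + k) + k - 1 = k - 1 := by omega
      rw [h1, h2, Nat.add_div_right _ hk, Nat.div_eq_of_lt (by omega), Nat.div_eq_of_lt (by omega)]
  rw [hcnt, List.range_succ_eq_map, List.filterMap_cons]
  simp only [Nat.mul_zero, Nat.add_zero, List.getElem?_eq_getElem hj]
  rw [List.filterMap_map]
  congr 1
  apply List.filterMap_congr
  intro x _
  show xs[j + k * (x + 1)]? = xs[j + k + k * x]?
  congr 1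
  ring

theorem pvSliceList_eq_stride {alpha : Type} (xs : List alpha) (k : Nat) (hk : 0 < k) :
    ∀ j, pvSliceList xs j k = pvStride (xs.drop j) k := by
  have H : ∀ m j, xs.length - j ≤ m → pvSliceList xs j k = pvStride (xs.drop j) k := by
    intro m
    induction m with
    | zero =>
      intro j h
      rw [pvSliceList_ge xs j k hk (by omega), List.drop_eq_nil_of_le (by omega)]
      simp [pvStride]
    | succ m ihm =>
      intro j h
      by_cases hj : j < xs.length
      · rw [pvSliceList_lt xs j k hk hj, ihm (j + k) (by omega), List.drop_eq_getElem_cons hj]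
        conv_rhs => rw [pvStride]
        congr 1
        rw [List.drop_drop]
        have he : j + 1 + (k - 1) = j + k := by omega
        rw [he]
      · rw [pvSliceList_ge xs j k hk (by omega), List.drop_eq_nil_of_le (by omega)]
        simp [pvStride]
  intro j
  exact H xs.length j (by omega)

theorem pvCollect_eq_stride {alpha : Type} (k : Nat) (hk : 0 < k) :
    ∀ (names : List alpha) (i j : Nat), j < k →
      pvCollect names i j k = pvStride (names.drop ((j + k - i % k) % k)) k := by
  intro names
  induction names with
  | nil => intro i j hj; simp [pvCollect, pvStride]
  | cons x t ih =>
    intro i j hj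
    have hr : i % k < k := Nat.mod_lt _ hk
    by_cases hc : i % k = j
    · have h1 : (j + k - i % k) % k = 0 := by
        rw [hc]
        have h : j + k - j = k := by omega
        rw [h, Nat.mod_self]
      have h2 : (j + k - (i + 1) % k) % k = k - 1 := by
        rw [pvSuccMod i k hk]
        split_ifs with h
        · rw [pvModSmall _ _ hk (by omega)]
          split_ifs <;> omega
        · rw [pvModSmall _ _ hk (by omega)]
          split_ifs <;> omega
      simp only [pvCollect, if_pos hc]
      rw [ih (i + 1) j hj, h1, h2, List.drop_zero]
      conv_rhs => rw [pvStride]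
      simp
    · have h2 : ∃ m, (j + k - i % k) % k = m + 1 ∧ (j + k - (i + 1) % k) % k = m := by
        rw [pvSuccMod i k hk]
        split_ifs with h
        · exact ⟨j, by rw [pvModSmall _ _ hk (by omega)]; split_ifs <;> omega,
                  by rw [pvModSmall _ _ hk (by omega)]; split_ifs <;> omega⟩
        · by_cases hjr : j < i % k
          · exact ⟨j + k - i % k - 1, by rw [pvModSmall _ _ hk (by omega)]; split_ifs <;> omega,
                    by rw [pvModSmall _ _ hk (by omega)]; split_ifs <;> omega⟩
          · exact ⟨j - i % k - 1, by rw [pvModSmall _ _ hk (by omega)]; split_ifs <;> omega,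
                    by rw [pvModSmall _ _ hk (by omega)]; split_ifs <;> omega⟩
      obtain ⟨m, hm1, hm2⟩ := h2
      simp only [pvCollect, if_neg hc]
      rw [ih (i + 1) j hj, hm1, hm2, List.drop_succ_cons]
      simp

theorem pvBucketInv {alpha : Type} (k : Nat) (hk : 0 < k) :
    ∀ (names : List alpha) (i0 : Nat) (bs : List (List alpha)), bs.length = k →
      (((PySem.List.enumerate names (i0 : Int)).foldl
          (fun bs it =>
            bs.set ((PySem.Int.mod it.1 (k : Int)).toNat)
              ((bs.getD ((PySem.Int.mod it.1 (k : Int)).toNat) []) ++ [it.2])) bs).length = k) ∧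
      (∀ j, j < k →
        ((PySem.List.enumerate names (i0 : Int)).foldl
          (fun bs it =>
            bs.set ((PySem.Int.mod it.1 (k : Int)).toNat)
              ((bs.getD ((PySem.Int.mod it.1 (k : Int)).toNat) []) ++ [it.2])) bs).getD j []
          = bs.getD j [] ++ pvCollect names i0 j k) := by
  intro names
  induction names with
  | nil =>
    intro i0 bs hlen
    simp [PySem.List.enumerate_nil, hlen, pvCollect]
  | cons x t ih =>
    intro i0 bs hlen
    rw [PySem.List.enumerate_cons]
    simp only [List.foldl_cons]
    have hidx : (PySem.Int.mod (i0 : Int) (k : Int)).toNat = i0 % k := by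
      rw [PySem.Int.mod, Int.fmod_eq_emod]; omega
    rw [hidx]
    have hcast : ((i0 : Int) + 1) = ((i0 + 1 : Nat) : Int) := by push_cast; ring
    rw [hcast]
    have hmlt : i0 % k < k := Nat.mod_lt _ hk
    have hlen' : (bs.set (i0 % k) (bs.getD (i0 % k) [] ++ [x])).length = k := by
      simp [hlen]
    obtain ⟨ih1, ih2⟩ := ih (i0 + 1) (bs.set (i0 % k) (bs.getD (i0 % k) [] ++ [x])) hlen'
    refine ⟨ih1, ?_⟩
    intro j hj
    rw [ih2 j hj]
    have hset : (bs.set (i0 % k) (bs.getD (i0 % k) [] ++ [x])).getD j []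
        = bs.getD j [] ++ (if i0 % k = j then [x] else []) := by
      simp only [List.getD, List.getElem?_set]
      split_ifs with h h2
      · subst h
        simp
      · exact absurd (hlen ▸ hmlt) h2
      · exact (List.append_nil _).symm
    rw [hset, pvCollect, List.append_assoc]

theorem pvZipFold (names : List String) (k : Nat) :
    ∀ (ts : List String) (bs : List (List String)) (n0 : Nat)
      (d : PySem.Dict String (List String)),
      bs.length = ts.length →
      (∀ j, j < ts.length → bs.getD j [] = pvSliceList names (n0 + j) k) →
      (PySem.List.enumerate ts (n0 : Int)).foldl
          (fun d it =>
            ((PySem.List.slice? names (some it.1) none (k : Int)).getD []).foldl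
              (fun d p => d.modify it.2 [] (fun v => v ++ [p])) (d.insert it.2 [])) d
        = (ts.zip bs).foldl (fun d p => d.insert p.1 p.2) d := by
  intro ts
  induction ts with
  | nil => intro bs n0 d _ _; simp [PySem.List.enumerate_nil]
  | cons t ts ih =>
    intro bs n0 d hlen hget
    cases bs with
    | nil => simp at hlen
    | cons b bs' =>
      rw [PySem.List.enumerate_cons]
      simp only [List.foldl_cons, List.zip_cons_cons]
      have hb : b = pvSliceList names n0 k := by
        have h := hget 0 (by simp)
        simpa using h
      have h1 : ((PySem.List.slice? names (some ((n0 : Nat) : Int)) none (k : Int)).getD []).foldl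
          (fun d p => d.modify t [] (fun v => v ++ [p])) (d.insert t []) = d.insert t b := by
        rw [pvInnerLoop, hb]
        rfl
      rw [h1]
      have hcast : ((n0 : Int) + 1) = ((n0 + 1 : Nat) : Int) := by push_cast; ring
      rw [hcast]
      apply ih bs' (n0 + 1) (d.insert t b) (by simpa using hlen)
      intro j hj
      have h := hget (j + 1) (by simpa using hj)
      simpa [Nat.add_comm, Nat.add_assoc, Nat.add_left_comm] using h

-- ===== VERDICT (by name: the statement is the Claim_ definition above) =====
theorem balance_teams_spec : Claim_equal_balance_teams := by
  intro cpl teams _ _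
  unfold Spec_balance_teams balance_teams balance_teams_alt
  rw [pvFoldlAppendMap]
  simp only [List.nil_append]
  cases teams with
  | nil => rfl
  | cons t ts =>
    simp only [List.isEmpty_cons]
    set f : List (String × String) → String :=
      fun player => ((PySem.Dict.mk player).get? "name").getD "" with hf
    set names := cpl.map f with hnames
    set k := (t :: ts).length with hkdef
    have hk : 0 < k := by simp [hkdef]
    set bs0 : List (List String) := (t :: ts).map (fun _ => ([] : List String)) with hbs0
    have hbs0len : bs0.length = k := by simp [hbs0, hkdef]
    obtain ⟨hblen, hbget⟩ := pvBucketInv k hk names 0 bs0 hbs0len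
    set buckets := (PySem.List.enumerate names ((0 : Nat) : Int)).foldl
      (fun bs it =>
        bs.set ((PySem.Int.mod it.1 (k : Int)).toNat)
          ((bs.getD ((PySem.Int.mod it.1 (k : Int)).toNat) []) ++ [it.2])) bs0 with hbuck
    have hget' : ∀ j, j < (t :: ts).length → buckets.getD j [] = pvSliceList names (0 + j) k := by
      intro j hj
      rw [← hkdef] at hj
      rw [hbget j hj]
      have h0 : bs0.getD j [] = [] := by
        have hrep : bs0 = List.replicate k [] := by
          rw [hbs0, hkdef]; induction (t :: ts) with
          | nil => rfl
          | cons a l ihl => simp [List.replicate_succ, ihl]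
        rw [hrep, List.getD, List.getElem?_replicate]
        split <;> rfl
      rw [h0, List.nil_append, pvCollect_eq_stride k hk names 0 j hj]
      have : (j + k - 0 % k) % k = j := by
        simp [Nat.zero_mod, Nat.add_mod_right, Nat.mod_eq_of_lt hj]
      rw [this, ← pvSliceList_eq_stride names k hk j, Nat.zero_add]
    have hlen' : buckets.length = (t :: ts).length := by rw [hblen, hkdef]
    have hmain := pvZipFold names k (t :: ts) buckets 0 PySem.Dict.empty hlen' hget'
    simp only [Nat.cast_zero] at hmain hbuck
    rw [hmain]
    simp only [Bool.false_eq_true, if_false, ← hbuck]
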